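-- pv_equiv track=rewrite | github.com/ramesh0805/DOS_LABS | lamports.py | lamport_clock
-- ===== SOURCE A (Python) =====
-- def lamport_clock(events, messages):
--     clocks = [0 for _ in events]
--     timestamps = [[] for _ in events]
--
--     for i, process_events in enumerate(events):
--         for event in process_events:
--             clocks[i] += 1
--             if event.startswith('s'):
--                 msg_to = int(event[1]) - 1
--                 messages.append((i, msg_to, clocks[i]))
--             elif event.startswith('r'):
--                 msg_from = int(event[1]) - 1
--                 for m in messages:
--                     if m[0] == msg_from and m[1] == i:
--                         clocks[i] = max(clocks[i], m[2]) + 1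
--
--             timestamps[i].append(clocks[i])
--
--     return timestamps
-- ===== SOURCE B (Python) =====
-- def lamport_clock(events, messages):
--     # Index messages in buckets keyed by (sender, receiver); like A, sends are
--     # also appended to the caller's `messages` list (same side effect as A).
--     buckets = {}
--     for m in messages:
--         buckets.setdefault((m[0], m[1]), []).append(m[2])
--
--     timestamps = []
--     for i, process_events in enumerate(events):
--         clock = 0
--         row = []
--         for event in process_events:
--             clock += 1
--             if event.startswith('s'):
--                 msg_to = int(event[1]) - 1
--                 messages.append((i, msg_to, clock))
--                 buckets.setdefault((i, msg_to), []).append(clock)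
--             elif event.startswith('r'):
--                 msg_from = int(event[1]) - 1
--                 for t in buckets.get((msg_from, i), ()):
--                     clock = max(clock, t) + 1
--             row.append(clock)
--         timestamps.append(row)
--     return timestamps
-- ===== Notes on version B (the rewrite author's own statement) =====
-- stated objective: alternative
-- what changed: A rescans the entire (growing) messages list at every receive event and updates clocks/timestamps lists in place; B indexes message timestamps once into a dict of buckets keyed by (sender, receiver), extends the bucket on each send, and a receive folds over its own bucket only, with a local scalar clock and rows appended to the output.
import Mathlib
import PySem

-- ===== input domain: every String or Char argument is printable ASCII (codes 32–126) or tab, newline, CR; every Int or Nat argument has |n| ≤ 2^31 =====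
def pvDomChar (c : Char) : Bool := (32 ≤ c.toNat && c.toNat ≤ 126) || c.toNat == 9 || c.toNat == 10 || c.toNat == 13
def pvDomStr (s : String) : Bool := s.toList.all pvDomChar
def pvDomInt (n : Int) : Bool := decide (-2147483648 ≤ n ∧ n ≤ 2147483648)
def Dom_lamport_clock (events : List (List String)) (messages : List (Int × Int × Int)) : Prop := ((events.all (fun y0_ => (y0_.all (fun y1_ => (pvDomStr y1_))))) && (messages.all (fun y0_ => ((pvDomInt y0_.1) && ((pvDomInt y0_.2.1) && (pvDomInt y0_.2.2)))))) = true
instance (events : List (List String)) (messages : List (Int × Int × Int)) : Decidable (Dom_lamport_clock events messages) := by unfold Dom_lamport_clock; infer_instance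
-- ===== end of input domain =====

-- B replaces A's full scan of `messages` at every receive event by buckets keyed by (sender, receiver)
-- built once and extended at each send; equivalence is about the RETURN value (both Pythons also
-- append the sends to the caller's `messages` list — the side effect is identical in A and B).

-- int(event[1]) of the Python sources (shared by both ports: the literal expression is the same there)
def pvDigit1 (event : String) : Option Int :=
  (PySem.Str.pyGet? event 1).bind (fun c => PySem.Int.ofChars? [c])

-- ===== PORT A =====
-- state: (clocks, timestamps, messages)
def pvStepA (i : Int) (st : List Int × List (List Int) × List (Int × Int × Int)) (event : String) :
    List Int × List (List Int) × List (Int × Int × Int) :=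
  let clocks := (st.1).set i.toNat ((st.1).getD i.toNat 0 + 1)      -- clocks[i] += 1
  let st2 : List Int × List (Int × Int × Int) :=
    if PySem.Str.startswith event "s" then
      match pvDigit1 event with
      | some v => (clocks, st.2.2 ++ [(i, v - 1, clocks.getD i.toNat 0)])   -- messages.append
      | none => (clocks, st.2.2)                                            -- Python raises; outside Pre_
    else if PySem.Str.startswith event "r" then
      match pvDigit1 event with
      | some v =>
        ((st.2.2).foldl
          (fun cl m => if m.1 = v - 1 ∧ m.2.1 = i then cl.set i.toNat (max (cl.getD i.toNat 0) m.2.2 + 1) else cl)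
          clocks, st.2.2)
      | none => (clocks, st.2.2)                                            -- Python raises; outside Pre_
    else (clocks, st.2.2)
  (st2.1, (st.2.1).set i.toNat ((st.2.1).getD i.toNat [] ++ [st2.1.getD i.toNat 0]), st2.2)

def pvRowA (i : Int) (st : List Int × List (List Int) × List (Int × Int × Int)) (row : List String) :
    List Int × List (List Int) × List (Int × Int × Int) :=
  row.foldl (pvStepA i) st

def pvOuterA (st : List Int × List (List Int) × List (Int × Int × Int)) (ip : Int × List String) :
    List Int × List (List Int) × List (Int × Int × Int) :=
  pvRowA ip.1 st ip.2

def lamport_clock (events : List (List String)) (messages : List (Int × Int × Int)) : List (List Int) :=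
  ((PySem.List.enumerate events 0).foldl pvOuterA
    (events.map (fun _ => 0), events.map (fun _ => []), messages)).2.1

-- ===== PORT B =====
-- buckets[(sender, receiver)] = list of timestamps, in messages-list order
def pvBuildBuckets (messages : List (Int × Int × Int)) : PySem.Dict (Int × Int) (List Int) :=
  messages.foldl (fun b m => b.insert (m.1, m.2.1) (b.getD (m.1, m.2.1) [] ++ [m.2.2])) PySem.Dict.empty

-- state: (clock, row, messages, buckets)
def pvStepB (i : Int) (s : Int × List Int × List (Int × Int × Int) × PySem.Dict (Int × Int) (List Int))
    (event : String) : Int × List Int × List (Int × Int × Int) × PySem.Dict (Int × Int) (List Int) :=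
  let clock := s.1 + 1
  if PySem.Str.startswith event "s" then
    match pvDigit1 event with
    | some v => (clock, s.2.1 ++ [clock], s.2.2.1 ++ [(i, v - 1, clock)],
                 (s.2.2.2).insert (i, v - 1) ((s.2.2.2).getD (i, v - 1) [] ++ [clock]))
    | none => (clock, s.2.1 ++ [clock], s.2.2.1, s.2.2.2)                    -- Python raises; outside Pre_
  else if PySem.Str.startswith event "r" then
    match pvDigit1 event with
    | some v =>
      let clock := ((s.2.2.2).getD (v - 1, i) []).foldl (fun c t => max c t + 1) clock
      (clock, s.2.1 ++ [clock], s.2.2.1, s.2.2.2)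
    | none => (clock, s.2.1 ++ [clock], s.2.2.1, s.2.2.2)                    -- Python raises; outside Pre_
  else (clock, s.2.1 ++ [clock], s.2.2.1, s.2.2.2)

def pvRowB (i : Int) (s : Int × List Int × List (Int × Int × Int) × PySem.Dict (Int × Int) (List Int))
    (row : List String) : Int × List Int × List (Int × Int × Int) × PySem.Dict (Int × Int) (List Int) :=
  row.foldl (pvStepB i) s

def pvOuterB (st : List (List Int) × List (Int × Int × Int) × PySem.Dict (Int × Int) (List Int))
    (ip : Int × List String) : List (List Int) × List (Int × Int × Int) × PySem.Dict (Int × Int) (List Int) :=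
  let inner := pvRowB ip.1 (0, [], st.2.1, st.2.2) ip.2
  (st.1 ++ [inner.2.1], inner.2.2.1, inner.2.2.2)

def lamport_clock_alt (events : List (List String)) (messages : List (Int × Int × Int)) : List (List Int) :=
  ((PySem.List.enumerate events 0).foldl pvOuterB ([], messages, pvBuildBuckets messages)).1

-- ===== PRECONDITION & SPEC =====
-- Pre_ excludes exactly the inputs where Python A raises: an event starting with 's' or 'r' whose
-- second character is missing (IndexError) or not a digit int() accepts (ValueError).
def Pre_lamport_clock (events : List (List String)) (messages : List (Int × Int × Int)) : Prop :=
  ∀ row ∈ events, ∀ e ∈ row,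
    (PySem.Str.startswith e "s" || PySem.Str.startswith e "r") = true →
    (match PySem.Str.pyGet? e 1 with
     | some c => (PySem.Int.ofChars? [c]).isSome
     | none => false) = true
instance (events : List (List String)) (messages : List (Int × Int × Int)) : Decidable (Pre_lamport_clock events messages) := by unfold Pre_lamport_clock; infer_instance

def pvWitness_lamport_clock : List (List String) × (List (Int × Int × Int)) :=
  ([["s2", "x"], ["r1", "r1"]], [(0, 1, 5)])

def Spec_lamport_clock (events : List (List String)) (messages : List (Int × Int × Int)) (out : List (List Int)) : Prop := out = lamport_clock_alt events messages
instance (events : List (List String)) (messages : List (Int × Int × Int)) (out : List (List Int)) : Decidable (Spec_lamport_clock events messages out) := by unfold Spec_lamport_clock; infer_instance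

-- ===== CLAIM (what is proved, stated in full; the proofs are below) =====
def Claim_equal_lamport_clock : Prop := ∀ (events : List (List String)) (messages : List (Int × Int × Int)), Dom_lamport_clock events messages → Pre_lamport_clock events messages → Spec_lamport_clock events messages (lamport_clock events messages)

-- ===== LEMMAS AND PROOFS =====

-- buckets b agree with the message list: the (f,t) bucket is the list of timestamps of messages f→t
def pvBInv (b : PySem.Dict (Int × Int) (List Int)) (msgs : List (Int × Int × Int)) : Prop :=
  ∀ f t : Int, b.getD (f, t) [] = (msgs.filter (fun m => decide (m.1 = f ∧ m.2.1 = t))).map (fun m => m.2.2)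

lemma pv_set_self {α : Type} (l : List α) (i : Nat) (d : α) (h : i < l.length) :
    l.set i (l.getD i d) = l := by
  induction l generalizing i with
  | nil => simp at h
  | cons x xs ih =>
    cases i with
    | zero => simp [List.getD]
    | succ n => simp only [List.length_cons, Nat.succ_lt_succ_iff] at h
                simp [List.getD] at ih ⊢
                exact ih n h

lemma pv_getD_set {α : Type} (l : List α) (i : Nat) (a d : α) (h : i < l.length) :
    (l.set i a).getD i d = a := by simp [List.getD, h]

lemma pv_set_append {α : Type} (l : List α) (x y : α) (t : List α) :
    (l ++ x :: t).set l.length y = l ++ y :: t := by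
  induction l with
  | nil => rfl
  | cons a as ih => simp [ih]

lemma pv_getD_append {α : Type} (l : List α) (x : α) (t : List α) (d : α) :
    (l ++ x :: t).getD l.length d = x := by
  induction l with
  | nil => rfl
  | cons a as ih => simpa using ih

-- A's in-place receive loop over the whole message list = one set to the scalar fold over the matching bucket
lemma pv_recv (f t : Int) (idx : Nat) :
    ∀ (msgs : List (Int × Int × Int)) (cl : List Int), idx < cl.length →
    msgs.foldl (fun cl m => if m.1 = f ∧ m.2.1 = t then cl.set idx (max (cl.getD idx 0) m.2.2 + 1) else cl) cl
    = cl.set idx (((msgs.filter (fun m => decide (m.1 = f ∧ m.2.1 = t))).map (fun m => m.2.2)).foldl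
        (fun c x => max c x + 1) (cl.getD idx 0)) := by
  intro msgs
  induction msgs with
  | nil =>
    intro cl h
    simp only [List.foldl_nil, List.filter_nil, List.map_nil]
    exact (pv_set_self cl idx 0 h).symm
  | cons m ms ih =>
    intro cl h
    by_cases hc : m.1 = f ∧ m.2.1 = t
    · have hfc : List.filter (fun m => decide (m.1 = f ∧ m.2.1 = t)) (m :: ms)
          = m :: List.filter (fun m => decide (m.1 = f ∧ m.2.1 = t)) ms := by
        simp [hc]
      rw [List.foldl_cons, if_pos hc, ih _ (by simpa using h), hfc, List.map_cons, List.foldl_cons]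
      have h1 : (cl.set idx (max (cl.getD idx 0) m.2.2 + 1)).getD idx 0 = max (cl.getD idx 0) m.2.2 + 1 := by
        simp [List.getD, h]
      rw [h1, List.set_set]
    · have hfc : List.filter (fun m => decide (m.1 = f ∧ m.2.1 = t)) (m :: ms)
          = List.filter (fun m => decide (m.1 = f ∧ m.2.1 = t)) ms := by
        simp [hc]
      rw [List.foldl_cons, if_neg hc, ih _ h, hfc]

lemma pv_bInv_push {b : PySem.Dict (Int × Int) (List Int)} {msgs : List (Int × Int × Int)}
    (h : pvBInv b msgs) (x y c : Int) :
    pvBInv (b.insert (x, y) (b.getD (x, y) [] ++ [c])) (msgs ++ [(x, y, c)]) := by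
  intro f t
  rw [PySem.Dict.getD_insert, List.filter_append, List.map_append]
  by_cases he : (f, t) = (x, y)
  · obtain ⟨hf, ht⟩ : f = x ∧ t = y := Prod.mk.injEq .. ▸ by simpa using he
    subst hf; subst ht
    rw [if_pos rfl, h f t]
    simp
  · rw [if_neg he, h f t]
    have : ¬(x = f ∧ y = t) := fun ⟨h1, h2⟩ => he (by simp [h1, h2])
    simp [this]

lemma pv_bInv_build (messages : List (Int × Int × Int)) :
    pvBInv (pvBuildBuckets messages) messages := by
  have key : ∀ (ms : List (Int × Int × Int)) (b : PySem.Dict (Int × Int) (List Int)) (acc : List (Int × Int × Int)),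
      pvBInv b acc →
      pvBInv (ms.foldl (fun b m => b.insert (m.1, m.2.1) (b.getD (m.1, m.2.1) [] ++ [m.2.2])) b) (acc ++ ms) := by
    intro ms
    induction ms with
    | nil => intro b acc h; simpa using h
    | cons m rest ih =>
      intro b acc h
      have h2 := pv_bInv_push h m.1 m.2.1 m.2.2
      have := ih _ (acc ++ [(m.1, m.2.1, m.2.2)]) h2
      simpa using this
  have := key messages PySem.Dict.empty [] (by intro f t; rfl)
  simpa using this

-- one event: A's step on the shared lists = B's scalar step, written back at index i
lemma pv_step (e : String) (i : Nat) (cl : List Int) (ts : List (List Int))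
    (msgs : List (Int × Int × Int)) (bkts : PySem.Dict (Int × Int) (List Int))
    (hcl : i < cl.length) (hts : i < ts.length) (hinv : pvBInv bkts msgs) :
    pvStepA (↑i) (cl, ts, msgs) e
      = (cl.set i (pvStepB (↑i) (cl.getD i 0, ts.getD i [], msgs, bkts) e).1,
         ts.set i (pvStepB (↑i) (cl.getD i 0, ts.getD i [], msgs, bkts) e).2.1,
         (pvStepB (↑i) (cl.getD i 0, ts.getD i [], msgs, bkts) e).2.2.1)
    ∧ pvBInv (pvStepB (↑i) (cl.getD i 0, ts.getD i [], msgs, bkts) e).2.2.2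
             (pvStepB (↑i) (cl.getD i 0, ts.getD i [], msgs, bkts) e).2.2.1 := by
  have hset : i < (cl.set i (cl.getD i 0 + 1)).length := by simpa using hcl
  by_cases hs : PySem.Chars.startswith e.toList ['s'] = true
  · cases hv : pvDigit1 e with
    | some v =>
      constructor
      · simp [pvStepA, pvStepB, hs, hv, hcl]
      · have hB : (pvStepB (↑i) (cl.getD i 0, ts.getD i [], msgs, bkts) e)
            = ((cl.getD i 0 + 1 : Int), ts.getD i [] ++ [cl.getD i 0 + 1],
               msgs ++ [((i : Int), v - 1, cl.getD i 0 + 1)],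
               bkts.insert ((i : Int), v - 1) (bkts.getD ((i : Int), v - 1) [] ++ [cl.getD i 0 + 1])) := by
          simp [pvStepB, hs, hv]
        rw [hB]
        exact pv_bInv_push hinv (↑i) (v - 1) (cl.getD i 0 + 1)
    | none =>
      constructor
      · simp [pvStepA, pvStepB, hs, hv, hcl]
      · have : (pvStepB (↑i) (cl.getD i 0, ts.getD i [], msgs, bkts) e).2.2
            = (msgs, bkts) := by simp [pvStepB, hs, hv]
        rw [this]; exact hinv
  · by_cases hr : PySem.Chars.startswith e.toList ['r'] = true
    · cases hv : pvDigit1 e with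
      | some v =>
        have hrecv := pv_recv (v - 1) (↑i) i msgs (cl.set i (cl.getD i 0 + 1)) hset
        have hbk := hinv (v - 1) (↑i)
        constructor
        · simp only [pvStepA, pvStepB, hv, Int.toNat_natCast]
          rw [hrecv]
          simp [hbk, hcl, hset, List.set_set, List.getD, hs, hr]
        · have : (pvStepB (↑i) (cl.getD i 0, ts.getD i [], msgs, bkts) e).2.2
              = (msgs, bkts) := by simp [pvStepB, hs, hr, hv]
          rw [this]; exact hinv
      | none =>
        constructor
        · simp [pvStepA, pvStepB, hs, hr, hv, hcl]
        · have : (pvStepB (↑i) (cl.getD i 0, ts.getD i [], msgs, bkts) e).2.2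
              = (msgs, bkts) := by simp [pvStepB, hs, hr, hv]
          rw [this]; exact hinv
    · constructor
      · simp [pvStepA, pvStepB, hs, hr, hcl]
      · have : (pvStepB (↑i) (cl.getD i 0, ts.getD i [], msgs, bkts) e).2.2
            = (msgs, bkts) := by simp [pvStepB, hs, hr]
        rw [this]; exact hinv

-- one process row: only index i of clocks/timestamps changes, and it changes to B's scalar row result
lemma pv_row (row : List String) (i : Nat) :
    ∀ (cl : List Int) (ts : List (List Int)) (msgs : List (Int × Int × Int))
      (bkts : PySem.Dict (Int × Int) (List Int)),
    i < cl.length → i < ts.length → pvBInv bkts msgs →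
    pvRowA (↑i) (cl, ts, msgs) row
      = (cl.set i (pvRowB (↑i) (cl.getD i 0, ts.getD i [], msgs, bkts) row).1,
         ts.set i (pvRowB (↑i) (cl.getD i 0, ts.getD i [], msgs, bkts) row).2.1,
         (pvRowB (↑i) (cl.getD i 0, ts.getD i [], msgs, bkts) row).2.2.1)
    ∧ pvBInv (pvRowB (↑i) (cl.getD i 0, ts.getD i [], msgs, bkts) row).2.2.2
             (pvRowB (↑i) (cl.getD i 0, ts.getD i [], msgs, bkts) row).2.2.1 := by
  induction row with
  | nil =>
    intro cl ts msgs bkts hcl hts hinv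
    refine ⟨?_, hinv⟩
    simp only [pvRowA, pvRowB, List.foldl_nil]
    rw [pv_set_self cl i 0 hcl, pv_set_self ts i [] hts]
  | cons e row ih =>
    intro cl ts msgs bkts hcl hts hinv
    obtain ⟨hA, hInv2⟩ := pv_step e i cl ts msgs bkts hcl hts hinv
    have hcl1 : i < (cl.set i (pvStepB (↑i) (cl.getD i 0, ts.getD i [], msgs, bkts) e).1).length := by
      simpa using hcl
    have hts1 : i < (ts.set i (pvStepB (↑i) (cl.getD i 0, ts.getD i [], msgs, bkts) e).2.1).length := by
      simpa using hts
    obtain ⟨ih1, ih2⟩ := ih _ _ _ _ hcl1 hts1 hInv2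
    have hRA : pvRowA (↑i) (cl, ts, msgs) (e :: row)
        = pvRowA (↑i) (pvStepA (↑i) (cl, ts, msgs) e) row := rfl
    have hRB : ∀ s, pvRowB (↑i) s (e :: row) = pvRowB (↑i) (pvStepB (↑i) s e) row := fun _ => rfl
    rw [hRA, hA, hRB]
    rw [pv_getD_set cl i _ 0 hcl, pv_getD_set ts i _ [] hts] at ih1 ih2
    constructor
    · rw [ih1, List.set_set, List.set_set]
    · exact ih2

-- all remaining processes, indices from k: A's timestamps entries < k are finished rows = B's rows
lemma pv_outer (rest : List (List String)) :
    ∀ (k : Nat) (cl0 : List Int) (rows : List (List Int)) (msgs : List (Int × Int × Int))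
      (bkts : PySem.Dict (Int × Int) (List Int)),
    cl0.length = k → rows.length = k → pvBInv bkts msgs →
    ((PySem.List.enumerate rest ↑k).foldl pvOuterA
        (cl0 ++ List.replicate rest.length 0, rows ++ List.replicate rest.length [], msgs)).2.1
    = ((PySem.List.enumerate rest ↑k).foldl pvOuterB (rows, msgs, bkts)).1 := by
  induction rest with
  | nil =>
    intro k cl0 rows msgs bkts hk hr hinv
    simp [PySem.List.enumerate]
  | cons r rest ih =>
    intro k cl0 rows msgs bkts hk hr hinv
    rw [PySem.List.enumerate_cons]
    have hcl : k < (cl0 ++ List.replicate (r :: rest).length (0 : Int)).length := by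
      simp [hk]
    have hts : k < (rows ++ List.replicate (r :: rest).length ([] : List Int)).length := by
      simp [hr]
    have hg0 : (cl0 ++ List.replicate (r :: rest).length (0 : Int)).getD k 0 = 0 := by
      rw [List.length_cons, List.replicate_succ, ← hk]
      exact pv_getD_append cl0 0 _ 0
    have hgr : (rows ++ List.replicate (r :: rest).length ([] : List Int)).getD k [] = [] := by
      rw [List.length_cons, List.replicate_succ, ← hr]
      exact pv_getD_append rows [] _ []
    obtain ⟨hA, hInv2⟩ := pv_row r k
      (cl0 ++ List.replicate (r :: rest).length 0)
      (rows ++ List.replicate (r :: rest).length [])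
      msgs bkts hcl hts hinv
    rw [hg0, hgr] at hA hInv2
    simp only [List.foldl_cons]
    have hOA : pvOuterA (cl0 ++ List.replicate (r :: rest).length 0,
        rows ++ List.replicate (r :: rest).length [], msgs) (↑k, r)
        = pvRowA (↑k) (cl0 ++ List.replicate (r :: rest).length 0,
            rows ++ List.replicate (r :: rest).length [], msgs) r := rfl
    set b := pvRowB (↑k) (0, [], msgs, bkts) r with hbdef
    have hsetc : (cl0 ++ List.replicate (r :: rest).length (0 : Int)).set k b.1
        = (cl0 ++ [b.1]) ++ List.replicate rest.length 0 := by
      rw [List.length_cons, List.replicate_succ, ← hk, pv_set_append]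
      simp
    have hsett : (rows ++ List.replicate (r :: rest).length ([] : List Int)).set k b.2.1
        = (rows ++ [b.2.1]) ++ List.replicate rest.length [] := by
      rw [List.length_cons, List.replicate_succ, ← hr, pv_set_append]
      simp
    rw [hOA, hA, hsetc, hsett]
    have hcast : (↑k : Int) + 1 = ↑(k + 1) := by push_cast; ring
    rw [hcast]
    have := ih (k + 1) (cl0 ++ [b.1]) (rows ++ [b.2.1]) b.2.2.1 b.2.2.2
      (by simp [hk]) (by simp [hr]) hInv2
    rw [this]
    rfl

-- ===== VERDICT (by name: the statement is the Claim_ definition above) =====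
theorem lamport_clock_spec : Claim_equal_lamport_clock := by
  intro events messages _ _
  unfold Spec_lamport_clock lamport_clock lamport_clock_alt
  have h := pv_outer events 0 [] [] messages (pvBuildBuckets messages) rfl rfl (pv_bInv_build messages)
  simpa using h
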